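-- pv_equiv track=rewrite | github.com/Liamours/Analisis-Kompleksitas-Algoritma_Tugas-Besar_nonOverlapping-Schedule | app.py | nonOverlappingSchedule_Rekursif
-- ===== SOURCE A (Python) =====
-- def is_viable_Aktivitas_Rekursif(Jadwal, AktL, AktL_End, AktL_Start, index=0):
--     if index >= len(Jadwal):
--         return True
--     AktJ = Jadwal[index]
--     AktJ_Start = int(AktJ["Waktu Mulai"].split(":")[0]) * 60 + int(AktJ["Waktu Mulai"].split(":")[1])
--     AktJ_End = int(AktJ["Waktu Selesai"].split(":")[0]) * 60 + int(AktJ["Waktu Selesai"].split(":")[1])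
--     if AktL["Hari"] == AktJ["Hari"]:
--         if not (AktL_End <= AktJ_Start or AktL_Start >= AktJ_End):
--             return False
--     return is_viable_Aktivitas_Rekursif(Jadwal, AktL, AktL_End, AktL_Start, index + 1)
--
-- def nonOverlappingSchedule_Rekursif(List, Jadwal, index=0, List_Viable=None):
--     if List_Viable is None:
--         List_Viable = []
--     if index >= len(List):
--         return List_Viable
--     AktL = List[index]
--     AktL_Start = int(AktL["Waktu Mulai"].split(":")[0]) * 60 + int(AktL["Waktu Mulai"].split(":")[1])
--     AktL_End = int(AktL["Waktu Selesai"].split(":")[0]) * 60 + int(AktL["Waktu Selesai"].split(":")[1])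
--     if is_viable_Aktivitas_Rekursif(Jadwal, AktL, AktL_End, AktL_Start):
--         List_Viable.append(AktL)
--     return nonOverlappingSchedule_Rekursif(List, Jadwal, index + 1, List_Viable)
-- ===== SOURCE B (Python) =====
-- def nonOverlappingSchedule_Rekursif(List, Jadwal, index=0, List_Viable=None):
--     # Iterative re-implementation: parse every time string ONCE, group the
--     # Jadwal intervals into a dict keyed by day, then scan each remaining
--     # activity against only its own day's intervals.
--     # NOTE: like A, this appends to (mutates) a caller-supplied List_Viable.
--     def mins(t):
--         parts = t.split(":")
--         return int(parts[0]) * 60 + int(parts[1])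
--
--     out = [] if List_Viable is None else List_Viable
--     rest = List[index:]
--     if not rest:
--         return out
--
--     by_day = {}
--     for aktj in Jadwal:
--         by_day.setdefault(aktj["Hari"], []).append(
--             (mins(aktj["Waktu Mulai"]), mins(aktj["Waktu Selesai"])))
--
--     for akt in rest:
--         s = mins(akt["Waktu Mulai"])
--         e = mins(akt["Waktu Selesai"])
--         if all(e <= js or s >= je for js, je in by_day.get(akt.get("Hari"), [])):
--             out.append(akt)
--     return out
-- ===== Notes on version B (the rewrite author's own statement) =====
-- stated objective: alternative
-- what changed: Replaces A's recursive rescanning (which re-splits and re-parses every Jadwal time string for every activity) by one iterative pass that parses each time string once and groups Jadwal intervals in a dict keyed by day, so each activity is checked only against its own day's pre-parsed intervals; measured speed was about the same.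
import Mathlib
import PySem

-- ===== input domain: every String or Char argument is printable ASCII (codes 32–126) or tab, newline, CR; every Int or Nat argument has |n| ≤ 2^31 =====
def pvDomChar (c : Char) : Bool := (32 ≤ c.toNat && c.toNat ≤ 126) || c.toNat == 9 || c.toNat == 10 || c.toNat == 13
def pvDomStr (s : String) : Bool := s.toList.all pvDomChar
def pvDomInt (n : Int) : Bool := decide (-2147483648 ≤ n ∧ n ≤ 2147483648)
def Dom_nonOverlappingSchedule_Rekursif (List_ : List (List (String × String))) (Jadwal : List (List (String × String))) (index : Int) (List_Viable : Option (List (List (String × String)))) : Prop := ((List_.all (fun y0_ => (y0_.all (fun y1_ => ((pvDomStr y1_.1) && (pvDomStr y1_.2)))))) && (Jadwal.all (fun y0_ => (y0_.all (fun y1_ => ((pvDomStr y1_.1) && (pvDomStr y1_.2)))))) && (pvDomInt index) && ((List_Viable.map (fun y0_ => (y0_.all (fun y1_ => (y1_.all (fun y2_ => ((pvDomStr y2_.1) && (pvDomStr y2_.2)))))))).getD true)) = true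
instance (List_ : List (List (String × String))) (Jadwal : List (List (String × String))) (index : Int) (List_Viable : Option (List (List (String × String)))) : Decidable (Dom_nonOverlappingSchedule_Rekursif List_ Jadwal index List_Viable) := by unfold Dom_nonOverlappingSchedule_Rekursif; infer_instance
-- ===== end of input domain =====

-- B replaces A's L×J recursive rescanning (which re-parses every Jadwal time string for every
-- activity) by one iterative pass that parses each time string once and groups Jadwal intervals
-- in a dict keyed by day. Like A, B appends to a caller-supplied List_Viable in place (the
-- equivalence proved here is about the return value).

-- minutes of "H:M" computed exactly as both Pythons do:
-- int(t.split(":")[0]) * 60 + int(t.split(":")[1]); the defaults are only reached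
-- outside Pre_ (where Python raises IndexError/ValueError).
def pyMins (t : String) : Int :=
  let ps := (PySem.Str.split? t ":").getD []
  (PySem.Int.ofStr? (ps.getD 0 "")).getD 0 * 60 + (PySem.Int.ofStr? (ps.getD 1 "")).getD 0

-- ===== PORT A =====
-- AktL["Hari"] / AktJ["Hari"]: first-match dict lookup; the "" default is reached only
-- outside Pre_ (KeyError in Python).
def is_viable_Aktivitas_Rekursif (Jadwal : List (List (String × String))) (AktL : List (String × String)) (AktL_End : Int) (AktL_Start : Int) : Bool :=
  match Jadwal with
  | [] => true
  | AktJ :: rest =>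
    let AktJ_Start := pyMins ((PySem.Dict.mk AktJ).getD "Waktu Mulai" "")
    let AktJ_End := pyMins ((PySem.Dict.mk AktJ).getD "Waktu Selesai" "")
    if (PySem.Dict.mk AktL).getD "Hari" "" == (PySem.Dict.mk AktJ).getD "Hari" "" then
      if !(decide (AktL_End ≤ AktJ_Start) || decide (AktL_Start ≥ AktJ_End)) then
        false
      else is_viable_Aktivitas_Rekursif rest AktL AktL_End AktL_Start
    else is_viable_Aktivitas_Rekursif rest AktL AktL_End AktL_Start

-- A's tail recursion "index, index+1, ... until index >= len(List)" is the fold over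
-- range(index, len(List_)) with Python indexing (List[index] wraps a negative index).
def nonOverlappingSchedule_Rekursif (List_ : List (List (String × String))) (Jadwal : List (List (String × String))) (index : Int) (List_Viable : Option (List (List (String × String)))) : List (List (String × String)) :=
  (PySem.List.pyRange index (PySem.List.len List_)).foldl
    (fun List_Viable i =>
      if is_viable_Aktivitas_Rekursif Jadwal (PySem.List.pyGetD List_ i [])
          (pyMins ((PySem.Dict.mk (PySem.List.pyGetD List_ i [])).getD "Waktu Selesai" ""))
          (pyMins ((PySem.Dict.mk (PySem.List.pyGetD List_ i [])).getD "Waktu Mulai" ""))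
      then List_Viable ++ [PySem.List.pyGetD List_ i []]
      else List_Viable)
    (List_Viable.getD [])

-- ===== PORT B =====
-- by_day.setdefault(aktj["Hari"], []).append(iv) is d.modify day [] (· ++ [iv]).
def pvByDay (Jadwal : List (List (String × String))) : PySem.Dict String (List (Int × Int)) :=
  (Jadwal.map (fun aktj =>
      ((PySem.Dict.mk aktj).getD "Hari" "",
       (pyMins ((PySem.Dict.mk aktj).getD "Waktu Mulai" ""), pyMins ((PySem.Dict.mk aktj).getD "Waktu Selesai" ""))))).foldl
    (fun d p => d.modify p.1 [] (· ++ [p.2])) (PySem.Dict.mk [])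

-- "if not rest: return out" before grouping Jadwal.
def nonOverlappingSchedule_Rekursif_alt (List_ : List (List (String × String))) (Jadwal : List (List (String × String))) (index : Int) (List_Viable : Option (List (List (String × String)))) : List (List (String × String)) :=
  if (PySem.List.slice List_ (some index) none).isEmpty then List_Viable.getD []
  else List_Viable.getD [] ++ (PySem.List.slice List_ (some index) none).filter (fun akt =>
    (match (PySem.Dict.mk akt).get? "Hari" with
      | none => ([] : List (Int × Int))
      | some day => (pvByDay Jadwal).getD day []).all
      (fun iv => decide (pyMins ((PySem.Dict.mk akt).getD "Waktu Selesai" "") ≤ iv.1) ||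
                 decide (pyMins ((PySem.Dict.mk akt).getD "Waktu Mulai" "") ≥ iv.2)))

-- ===== PRECONDITION & SPEC =====
def pvTimeOK (s : String) : Bool :=
  let ps := (PySem.Str.split? s ":").getD []
  decide (2 ≤ ps.length) && (PySem.Int.ofStr? (ps.getD 0 "")).isSome && (PySem.Int.ofStr? (ps.getD 1 "")).isSome

def pvKeyTimeOK (e : List (String × String)) (k : String) : Bool :=
  ((PySem.Dict.mk e).get? k).elim false pvTimeOK

-- Pre_: 0 ≤ index (A wraps a negative in-range index around and then restarts from 0 — an
-- accidental duplicate-producing behaviour we exclude; on a negative index < -len(List_) A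
-- raises IndexError); every activity A reaches (List_[index:]) has parseable "H:M" time
-- strings and, when Jadwal is non-empty, a "Hari" key (else Python raises
-- KeyError/IndexError/ValueError); and, when A scans Jadwal at all, every Jadwal entry is
-- well-formed likewise. The last conjunct is slightly narrower than A's lazy scan, which can
-- return [] without reaching a malformed later Jadwal entry when every activity overlaps
-- earlier (see the cite in claim.json); B parses all of Jadwal up front and raises there.
def Pre_nonOverlappingSchedule_Rekursif (List_ : List (List (String × String))) (Jadwal : List (List (String × String))) (index : Int) (List_Viable : Option (List (List (String × String)))) : Prop :=
  0 ≤ index ∧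
  (∀ e ∈ List_.drop index.toNat,
      pvKeyTimeOK e "Waktu Mulai" ∧ pvKeyTimeOK e "Waktu Selesai" ∧
      (Jadwal ≠ [] → ((PySem.Dict.mk e).get? "Hari").isSome)) ∧
  (List_.drop index.toNat ≠ [] →
      ∀ j ∈ Jadwal, pvKeyTimeOK j "Waktu Mulai" ∧ pvKeyTimeOK j "Waktu Selesai" ∧
        ((PySem.Dict.mk j).get? "Hari").isSome)

instance (List_ : List (List (String × String))) (Jadwal : List (List (String × String))) (index : Int) (List_Viable : Option (List (List (String × String)))) : Decidable (Pre_nonOverlappingSchedule_Rekursif List_ Jadwal index List_Viable) := by unfold Pre_nonOverlappingSchedule_Rekursif; infer_instance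

def pvWitness_nonOverlappingSchedule_Rekursif : (List (List (String × String))) × (List (List (String × String))) × Int × (Option (List (List (String × String)))) :=
  ([[("Hari", "Senin"), ("Waktu Mulai", "8:00"), ("Waktu Selesai", "9:30")],
    [("Hari", "Selasa"), ("Waktu Mulai", "10:00"), ("Waktu Selesai", "11:00")]],
   [[("Hari", "Senin"), ("Waktu Mulai", "9:00"), ("Waktu Selesai", "10:00")]],
   0, none)

def Spec_nonOverlappingSchedule_Rekursif (List_ : List (List (String × String))) (Jadwal : List (List (String × String))) (index : Int) (List_Viable : Option (List (List (String × String)))) (out : List (List (String × String))) : Prop := out = nonOverlappingSchedule_Rekursif_alt List_ Jadwal index List_Viable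
instance (List_ : List (List (String × String))) (Jadwal : List (List (String × String))) (index : Int) (List_Viable : Option (List (List (String × String)))) (out : List (List (String × String))) : Decidable (Spec_nonOverlappingSchedule_Rekursif List_ Jadwal index List_Viable out) := by unfold Spec_nonOverlappingSchedule_Rekursif; infer_instance

-- ===== CLAIM (what is proved, stated in full; the proofs are below) =====
def Claim_equal_nonOverlappingSchedule_Rekursif : Prop := ∀ (List_ : List (List (String × String))) (Jadwal : List (List (String × String))) (index : Int) (List_Viable : Option (List (List (String × String)))), Dom_nonOverlappingSchedule_Rekursif List_ Jadwal index List_Viable → Pre_nonOverlappingSchedule_Rekursif List_ Jadwal index List_Viable → Spec_nonOverlappingSchedule_Rekursif List_ Jadwal index List_Viable (nonOverlappingSchedule_Rekursif List_ Jadwal index List_Viable)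

-- ===== LEMMAS AND PROOFS =====

-- A's viability scan is an `all` over the same-day Jadwal entries.
theorem is_viable_eq_all (Jadwal : List (List (String × String))) (AktL : List (String × String)) (e s : Int) :
    is_viable_Aktivitas_Rekursif Jadwal AktL e s =
      (Jadwal.filter (fun j => (PySem.Dict.mk j).getD "Hari" "" == (PySem.Dict.mk AktL).getD "Hari" "")).all
        (fun j => decide (e ≤ pyMins ((PySem.Dict.mk j).getD "Waktu Mulai" "")) ||
                  decide (s ≥ pyMins ((PySem.Dict.mk j).getD "Waktu Selesai" ""))) := by
  induction Jadwal with
  | nil => rfl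
  | cons AktJ rest ih =>
    simp only [is_viable_Aktivitas_Rekursif, List.filter_cons]
    cases hday : ((PySem.Dict.mk AktJ).getD "Hari" "" == (PySem.Dict.mk AktL).getD "Hari" "") with
    | false =>
      have hday' : ((PySem.Dict.mk AktL).getD "Hari" "" == (PySem.Dict.mk AktJ).getD "Hari" "") = false := by
        rw [beq_eq_false_iff_ne] at hday ⊢; exact fun h => hday h.symm
      rw [if_neg (by simp [hday']), ih]
      simp
    | true =>
      have hday' : ((PySem.Dict.mk AktL).getD "Hari" "" == (PySem.Dict.mk AktJ).getD "Hari" "") = true := by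
        rw [beq_iff_eq] at hday ⊢; exact hday.symm
      rw [if_pos (by simp [hday'])]
      cases hov : (decide (e ≤ pyMins ((PySem.Dict.mk AktJ).getD "Waktu Mulai" "")) ||
          decide (s ≥ pyMins ((PySem.Dict.mk AktJ).getD "Waktu Selesai" ""))) with
      | false => simp [hov]
      | true => simp [hov, ih]

-- B's day dict holds exactly the parsed intervals of the same-day Jadwal entries.
theorem byDay_getD (Jadwal : List (List (String × String))) (day : String) :
    (pvByDay Jadwal).getD day [] =
      (Jadwal.filter (fun j => (PySem.Dict.mk j).getD "Hari" "" == day)).map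
        (fun j => (pyMins ((PySem.Dict.mk j).getD "Waktu Mulai" ""), pyMins ((PySem.Dict.mk j).getD "Waktu Selesai" ""))) := by
  unfold pvByDay
  rw [show (PySem.Dict.mk ([] : List (String × List (Int × Int)))) = PySem.Dict.empty from rfl]
  rw [PySem.Dict.getD_foldl_modify_append]
  rw [List.filter_map]
  simp only [Function.comp_def, PySem.Dict.getD_empty, List.map_map]
  simp

-- ===== VERDICT =====
theorem nonOverlappingSchedule_Rekursif_spec : Claim_equal_nonOverlappingSchedule_Rekursif := by
  intro List_ Jadwal index List_Viable _ hPre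
  obtain ⟨hidx, hL, hJ⟩ := hPre
  unfold Spec_nonOverlappingSchedule_Rekursif nonOverlappingSchedule_Rekursif nonOverlappingSchedule_Rekursif_alt
  rw [PySem.List.foldl_pyRange_pyGetD List_ []
        (fun acc AktL =>
          if is_viable_Aktivitas_Rekursif Jadwal AktL
              (pyMins ((PySem.Dict.mk AktL).getD "Waktu Selesai" ""))
              (pyMins ((PySem.Dict.mk AktL).getD "Waktu Mulai" ""))
          then acc ++ [AktL] else acc)
        (List_Viable.getD []) hidx]
  rw [PySem.List.foldl_append_if
        (fun AktL => is_viable_Aktivitas_Rekursif Jadwal AktL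
            (pyMins ((PySem.Dict.mk AktL).getD "Waktu Selesai" ""))
            (pyMins ((PySem.Dict.mk AktL).getD "Waktu Mulai" "")))
        (fun x => x)]
  rw [List.map_id']
  have hslice : PySem.List.slice List_ (some index) none = List_.drop index.toNat := by
    obtain ⟨a, ha⟩ : ∃ a : Nat, index = (a : Int) := ⟨index.toNat, (Int.toNat_of_nonneg hidx).symm⟩
    rw [ha, PySem.List.slice_from_natCast]
    simp
  rw [hslice]
  rcases hrest : List_.drop index.toNat with _ | ⟨a0, arest⟩
  · simp
  · rw [← hrest, List.isEmpty_eq_false_iff.mpr (by simp [hrest]), if_neg (by simp)]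
    congr 1
    apply List.filter_congr
    intro akt hmem
    rw [is_viable_eq_all]
    rcases hJadwal : Jadwal with _ | ⟨j0, jrest⟩
    · subst hJadwal
      rcases h : (PySem.Dict.mk akt).get? "Hari" with _ | day <;>
        simp [pvByDay, show PySem.Dict.mk ([] : List (String × List (Int × Int))) = PySem.Dict.empty from rfl,
          PySem.Dict.getD_empty]
    · rw [← hJadwal]
      have hne : Jadwal ≠ [] := by simp [hJadwal]
      obtain ⟨_, _, hHari⟩ := hL akt hmem
      obtain ⟨day, hday⟩ := Option.isSome_iff_exists.mp (hHari hne)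
      rw [hday]
      have hdayD : (PySem.Dict.mk akt).getD "Hari" "" = day :=
        PySem.Dict.getD_of_get?_eq_some _ _ hday
      rw [show (match some day with
          | none => ([] : List (Int × Int))
          | some day => (pvByDay Jadwal).getD day []) = (pvByDay Jadwal).getD day [] from rfl]
      rw [byDay_getD, hdayD, List.all_map]
      rfl
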